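-- pv_equiv track=rewrite | github.com/amazon-braket/amazon-braket-algorithm-library | textbook_algorithms/Bernstein_Vazirani_algorithm/bernstein_vazirani.py | marginalize_measurements
-- ===== SOURCE A (Python) =====
-- from collections import Counter
--
-- def marginalize_measurements(measurement_counts: Counter) -> Counter:
--     """Remove the last qubit measurement counts.
--
--     Args:
--         measurement_counts (Counter): Measurement counts from circuit.
--
--     Returns:
--         Counter: Measurement counts from without the last qubit.
--     """
--     new_dict = {}
--     for k, v in measurement_counts.items():
--         if k[:-1] not in new_dict:
--             new_dict[k[:-1]] = v
--         else:
--             new_dict[k[:-1]] += v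
--     return Counter(new_dict)
-- ===== SOURCE B (Python) =====
-- from collections import Counter
--
--
-- def marginalize_measurements(measurement_counts: Counter) -> Counter:
--     """Remove the last qubit measurement counts (two-pass: dedup prefixes, then sum each)."""
--     items = [(k[:-1], v) for k, v in measurement_counts.items()]
--     prefixes = list(dict.fromkeys(p for p, _ in items))
--     return Counter({p: sum(v for q, v in items if q == p) for p in prefixes})
-- ===== Notes on version B (the rewrite author's own statement) =====
-- stated objective: alternative
-- what changed: Replaces A's single-pass dict accumulation (membership test + in-place +=) with a two-pass scheme: first dedupe the truncated keys in first-occurrence order via dict.fromkeys, then compute each prefix's total by a direct sum over the truncated item list.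
import Mathlib
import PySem

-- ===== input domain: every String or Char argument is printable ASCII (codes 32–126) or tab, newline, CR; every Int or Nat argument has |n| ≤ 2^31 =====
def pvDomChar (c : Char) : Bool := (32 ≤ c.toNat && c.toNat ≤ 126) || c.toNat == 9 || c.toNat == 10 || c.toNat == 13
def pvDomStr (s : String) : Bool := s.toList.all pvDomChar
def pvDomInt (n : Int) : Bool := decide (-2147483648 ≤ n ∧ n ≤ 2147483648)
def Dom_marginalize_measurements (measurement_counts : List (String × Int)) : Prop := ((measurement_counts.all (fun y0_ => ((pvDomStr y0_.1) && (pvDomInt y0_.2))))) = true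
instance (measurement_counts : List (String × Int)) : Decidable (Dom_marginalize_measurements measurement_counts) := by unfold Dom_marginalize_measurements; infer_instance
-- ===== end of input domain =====

-- B replaces A's single-pass dict accumulation by a two-pass scheme (dedup the truncated
-- keys in first-occurrence order, then total each prefix by a direct sum); same result.


-- k[:-1] on a Python string (shared by both ports: both Pythons write k[:-1])
def pyPrefix (s : String) : String := String.ofList (PySem.List.slice s.toList none (some (-1)))

-- ===== PORT A =====
-- new_dict = {}; for k, v in measurement_counts.items(): if k[:-1] not in new_dict: new_dict[k[:-1]] = v
-- else: new_dict[k[:-1]] += v; return Counter(new_dict)   (returned as its items list)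
def marginalize_measurements (measurement_counts : List (String × Int)) : List (String × Int) :=
  ((PySem.Dict.ofList measurement_counts).items.foldl
    (fun (nd : PySem.Dict String Int) kv =>
      if nd.contains (pyPrefix kv.1) then
        nd.insert (pyPrefix kv.1) (nd.getD (pyPrefix kv.1) 0 + kv.2)
      else
        nd.insert (pyPrefix kv.1) kv.2)
    PySem.Dict.empty).items

-- ===== PORT B =====
-- items = [(k[:-1], v) …]; prefixes = list(dict.fromkeys(p for p, _ in items));
-- return Counter({p: sum(v for q, v in items if q == p) for p in prefixes})
def marginalize_measurements_alt (measurement_counts : List (String × Int)) : List (String × Int) :=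
  let items := (PySem.Dict.ofList measurement_counts).items.map (fun kv => (pyPrefix kv.1, kv.2))
  let prefixes := PySem.Set.ofList (items.map (·.1))
  prefixes.map (fun p => (p, ((items.filter (fun q => q.1 == p)).map (·.2)).sum))

-- ===== PRECONDITION & SPEC =====
def Spec_marginalize_measurements (measurement_counts : List (String × Int)) (out : List (String × Int)) : Prop := out = marginalize_measurements_alt measurement_counts
instance (measurement_counts : List (String × Int)) (out : List (String × Int)) : Decidable (Spec_marginalize_measurements measurement_counts out) := by unfold Spec_marginalize_measurements; infer_instance

-- ===== CLAIM (what is proved, stated in full; the proofs are below) =====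
def Claim_equal_marginalize_measurements : Prop := ∀ (measurement_counts : List (String × Int)), Dom_marginalize_measurements measurement_counts → Spec_marginalize_measurements measurement_counts (marginalize_measurements measurement_counts)

-- ===== LEMMAS AND PROOFS =====

-- A's branching step is the uniform "insert key (old+v)" step
theorem stepA_eq (nd : PySem.Dict String Int) (kv : String × Int) :
    (if nd.contains (pyPrefix kv.1) then
        nd.insert (pyPrefix kv.1) (nd.getD (pyPrefix kv.1) 0 + kv.2)
      else
        nd.insert (pyPrefix kv.1) kv.2)
    = nd.insert (pyPrefix kv.1) (nd.getD (pyPrefix kv.1) 0 + kv.2) := by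
  split_ifs with h
  · rfl
  · rw [PySem.Dict.getD_of_not_contains _ _ (by simpa using h), Int.zero_add]

-- value accumulated at k by the uniform fold = old value + sum of matching values
theorem getD_fold (l : List (String × Int)) (d : PySem.Dict String Int) (k : String) :
    (l.foldl (fun (nd : PySem.Dict String Int) kv =>
        nd.insert (pyPrefix kv.1) (nd.getD (pyPrefix kv.1) 0 + kv.2)) d).getD k 0
    = d.getD k 0 + ((l.filter (fun q => pyPrefix q.1 == k)).map (·.2)).sum := by
  induction l generalizing d with
  | nil => simp
  | cons p t ih =>
    simp only [List.foldl_cons, ih, List.filter_cons]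
    by_cases h : pyPrefix p.1 = k
    · subst h
      simp [PySem.Dict.getD_insert_self]
      ring
    · rw [PySem.Dict.getD_insert_of_ne _ _ _ (Ne.symm h)]
      simp [beq_iff_eq, h]

-- (verdict below)
theorem marginalize_measurements_spec : Claim_equal_marginalize_measurements := by
  intro mc _
  unfold Spec_marginalize_measurements marginalize_measurements marginalize_measurements_alt
  simp only []
  set l := (PySem.Dict.ofList mc).items with hl
  have hstep : (fun (nd : PySem.Dict String Int) (kv : String × Int) =>
      if nd.contains (pyPrefix kv.1) then
        nd.insert (pyPrefix kv.1) (nd.getD (pyPrefix kv.1) 0 + kv.2)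
      else
        nd.insert (pyPrefix kv.1) kv.2)
      = fun nd kv => nd.insert (pyPrefix kv.1) (nd.getD (pyPrefix kv.1) 0 + kv.2) := by
    funext nd kv; exact stepA_eq nd kv
  rw [hstep]
  set N := l.foldl (fun (nd : PySem.Dict String Int) kv =>
      nd.insert (pyPrefix kv.1) (nd.getD (pyPrefix kv.1) 0 + kv.2)) PySem.Dict.empty with hN
  have hkeys : N.keys = PySem.Set.ofList (l.map (fun kv => pyPrefix kv.1)) := by
    rw [hN, PySem.Dict.keys_foldl_insert_key]
    simp [PySem.Set.update_nil_left]
  have hnd : N.keys.Nodup := by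
    rw [hkeys]; exact PySem.Set.nodup_ofList _
  have hitems : N.items = N.keys.map (fun k => (k, N.getD k 0)) :=
    PySem.Dict.items_eq_map_keys N hnd 0
  rw [hitems, hkeys]
  have hmap : (l.map (fun kv => (pyPrefix kv.1, kv.2))).map (·.1)
      = l.map (fun kv => pyPrefix kv.1) := by
    simp
  rw [hmap]
  apply List.map_congr_left
  intro k _
  have hval : N.getD k 0 = ((l.filter (fun q => pyPrefix q.1 == k)).map (·.2)).sum := by
    rw [hN, getD_fold]; simp
  have hfil : (l.map (fun kv => (pyPrefix kv.1, kv.2))).filter (fun q => q.1 == k)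
      = (l.filter (fun q => pyPrefix q.1 == k)).map (fun kv => (pyPrefix kv.1, kv.2)) := by
    rw [List.filter_map]; rfl
  rw [hval, hfil]
  simp [Function.comp_def]

-- ===== VERDICT (by name: the statement is the Claim_ definition above) =====
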